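-- pv_equiv track=rewrite | github.com/marksbrown/adventofcode | 2023/day1.py | parse
-- ===== SOURCE A (Python) =====
-- from string import ascii_lowercase, digits
--
-- written_digits = (
--     "zero",
--     "one",
--     "two",
--     "three",
--     "four",
--     "five",
--     "six",
--     "seven",
--     "eight",
--     "nine",
--     "ten",
-- )
--
-- def parse(v):
--     """
--     >>> parse("1abc2")
--     '12'
--     >>> parse("two1nine")
--     '219'
--     >>> parse("eightwothree")
--     '823'
--     >>> parse("abcone2threexyz")
--     '123'
--     >>> parse("treb7uchet")
--     '7'
--     >>> parse("4nineeightseven2")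
--     '49872'
--     >>> parse("ftjjqbgphtmhthreesix1six")
--     '3616'
--     """
--     values = []
--     for j, sym in enumerate(v):
--         if sym in digits:
--             values.append(sym)
--         for digit in written_digits:
--             if digit in v[j : j + len(digit)]:
--                 values.append(str(written_digits.index(digit)))
--
--     return "".join(values)
-- ===== SOURCE B (Python) =====
-- from string import digits
--
-- written_digits = (
--     "zero", "one", "two", "three", "four", "five",
--     "six", "seven", "eight", "nine", "ten",
-- )
--
-- def parse(v):
--     # word-major bucket fill: one bucket per position, then flatten in index order
--     buckets = [[] for _ in range(len(v))]
--     for i, c in enumerate(v):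
--         if c in digits:
--             buckets[i].append(c)
--     for d, word in enumerate(written_digits):
--         for k in range(len(v)):
--             if v.startswith(word, k):
--                 buckets[k].append(str(d))
--     return "".join(s for b in buckets for s in b)
-- ===== Notes on version B (the rewrite author's own statement) =====
-- stated objective: alternative
-- what changed: Replaces A's position-major scan (for each index, test every written digit against a slice and look its value up with list.index) by a word-major pass: a per-position bucket table is filled for digit characters and then for each written digit at every start position via str.startswith, and the buckets are flattened in index order.
import Mathlib
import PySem

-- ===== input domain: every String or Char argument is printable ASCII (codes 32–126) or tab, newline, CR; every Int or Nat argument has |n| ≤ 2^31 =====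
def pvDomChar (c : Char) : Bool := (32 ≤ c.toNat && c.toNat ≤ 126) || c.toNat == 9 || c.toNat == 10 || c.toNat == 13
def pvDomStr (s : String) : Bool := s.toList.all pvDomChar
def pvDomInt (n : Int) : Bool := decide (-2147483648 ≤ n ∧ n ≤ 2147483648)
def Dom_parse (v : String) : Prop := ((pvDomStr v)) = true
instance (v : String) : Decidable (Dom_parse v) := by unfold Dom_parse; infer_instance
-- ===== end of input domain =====

-- B replaces A's position-major scan (slice test of every written digit at each index, value via
-- list.index) by a word-major bucket-table fill flattened in index order: alternative decomposition,
-- same asymptotic cost.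

-- shared module constants (string.digits and the written_digits tuple)
def pvDigits : String := "0123456789"
def pvWritten : List String :=
  ["zero", "one", "two", "three", "four", "five", "six", "seven", "eight", "nine", "ten"]

-- ===== PORT A =====
def parse (v : String) : String :=
  let values : List String :=
    (PySem.List.enumerate v.toList 0).foldl (fun acc p =>
      let acc := if PySem.Chars.isIn [p.2] pvDigits.toList then acc ++ [String.singleton p.2] else acc
      pvWritten.foldl (fun acc digit =>
        if PySem.Chars.isIn digit.toList
            (PySem.List.slice v.toList (some p.1) (some (p.1 + (digit.toList.length : Int)))) then
          acc ++ [PySem.Int.toStr (((PySem.List.index? pvWritten digit).getD 0 : Nat) : Int)]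
        else acc) acc) []
  PySem.Str.join "" values

-- ===== PORT B =====
-- v.startswith(word, k) with 0 ≤ k ≤ len(v) is ported exactly as startswith on v[k:] (drop k)
def parse_alt (v : String) : String :=
  let n := v.toList.length
  let buckets : List (List String) := List.replicate n []
  let buckets := (PySem.List.enumerate v.toList 0).foldl (fun bs p =>
      if PySem.Chars.isIn [p.2] pvDigits.toList then
        bs.modify p.1.toNat (· ++ [String.singleton p.2])
      else bs) buckets
  let buckets := (PySem.List.enumerate pvWritten 0).foldl (fun bs dw =>
      (PySem.List.pyRange 0 (n : Int) 1).foldl (fun bs k =>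
        if PySem.Chars.startswith (v.toList.drop k.toNat) dw.2.toList then
          bs.modify k.toNat (· ++ [PySem.Int.toStr dw.1])
        else bs) bs) buckets
  PySem.Str.join "" (buckets.flatMap id)

-- ===== PRECONDITION & SPEC =====
def Spec_parse (v : String) (out : String) : Prop := out = parse_alt v
instance (v : String) (out : String) : Decidable (Spec_parse v out) := by unfold Spec_parse; infer_instance

-- ===== CLAIM (what is proved, stated in full; the proofs are below) =====
def Claim_equal_parse : Prop := ∀ (v : String), Dom_parse v → Spec_parse v (parse v)

-- ===== LEMMAS AND PROOFS =====

-- the contribution of position j, in A's append order: digit char first, then written digits in tuple order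
def pvDigitPart (cs : List Char) (j : Nat) : List String :=
  if PySem.Chars.isIn [cs.getD j ' '] pvDigits.toList then [String.singleton (cs.getD j ' ')] else []

def pvWordPart (cs : List Char) (j : Nat) : List String :=
  (PySem.List.enumerate pvWritten 0).flatMap (fun dw =>
    if PySem.Chars.startswith (cs.drop j) dw.2.toList then [PySem.Int.toStr dw.1] else [])

def pvContrib (cs : List Char) (j : Nat) : List String := pvDigitPart cs j ++ pvWordPart cs j

-- enumerate as a map over range
theorem pv_enum_eq (cs : List Char) (s : Nat) :
    PySem.List.enumerate cs (s : Int) =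
      (List.range cs.length).map (fun k => (((s + k : Nat) : Int), cs.getD k ' ')) := by
  induction cs generalizing s with
  | nil => simp [PySem.List.enumerate_nil]
  | cons c cs ih =>
    rw [PySem.List.enumerate_cons]
    have : ((s : Int) + 1) = ((s + 1 : Nat) : Int) := by push_cast; ring
    rw [this, ih]
    simp [List.range_succ_eq_map, List.map_map, Function.comp]
    intro a _
    omega

-- substring test on a length-bounded slice is a prefix test
theorem pv_infix_take_iff {α : Type} (w l : List α) : w <:+: l.take w.length ↔ w <+: l := by
  constructor
  · rintro ⟨pre, suf, h⟩
    have hlen := congrArg List.length h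
    simp [List.length_take] at hlen
    have hpre : pre.length = 0 := by omega
    have hsuf : suf.length = 0 := by omega
    rw [List.length_eq_zero_iff] at hpre hsuf
    subst hpre; subst hsuf
    simp at h
    have := List.take_prefix w.length l
    rwa [← h] at this
  · intro h
    exact (List.prefix_take_iff.mpr ⟨h, le_rfl⟩).isInfix

theorem pv_cond_eq (cs : List Char) (j : Nat) (w : List Char) :
    PySem.Chars.isIn w (PySem.List.slice cs (some (j : Int)) (some ((j : Int) + (w.length : Int)))) =
      PySem.Chars.startswith (cs.drop j) w := by
  rw [PySem.List.slice_natCast_add]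
  by_cases h : w <+: cs.drop j
  · rw [(PySem.Chars.isIn_iff_infix _ _).mpr (by rw [pv_infix_take_iff]; exact h),
        (PySem.Chars.startswith_iff _ _).mpr h]
  · have h1 : PySem.Chars.isIn w ((cs.drop j).take w.length) = false := by
      rw [Bool.eq_false_iff]; intro hc
      exact h ((pv_infix_take_iff _ _).mp ((PySem.Chars.isIn_iff_infix _ _).mp hc))
    have h2 : PySem.Chars.startswith (cs.drop j) w = false := by
      rw [Bool.eq_false_iff]; intro hc
      exact h ((PySem.Chars.startswith_iff _ _).mp hc)
    rw [h1, h2]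

-- A's word list at j equals B's bucket entries at j (same literal word tuple, same order)
theorem pv_words_eq_gen (ws : List String) (p : String → Bool) (g : Int → String)
    (full : List String) (s : Nat)
    (h : ∀ k (hk : k < ws.length), PySem.List.index? full ws[k] = some (s + k)) :
    (ws.filter p).map (fun w => g (((PySem.List.index? full w).getD 0 : Nat) : Int)) =
      (PySem.List.enumerate ws (s : Int)).flatMap (fun dw => if p dw.2 then [g dw.1] else []) := by
  induction ws generalizing s with
  | nil => simp [PySem.List.enumerate_nil]
  | cons w ws ih =>
    rw [PySem.List.enumerate_cons]
    have h0 : PySem.List.index? full w = some s := by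
      have := h 0 (by simp); simpa using this
    have hs1 : (s : Int) + 1 = ((s + 1 : Nat) : Int) := by push_cast; ring
    have hrec := ih (s + 1) (fun k hk => by
      have := h (k + 1) (by simp; omega)
      simpa [Nat.add_assoc, Nat.add_comm 1 k] using this)
    by_cases hp : p w
    · rw [List.filter_cons_of_pos hp, List.map_cons, List.flatMap_cons, if_pos hp, hs1, ← hrec, h0]
      simp
    · rw [List.filter_cons_of_neg hp, List.flatMap_cons, if_neg hp, hs1, ← hrec]
      simp
  
theorem pv_getD_modify {α : Type} (bs : List (List α)) {j : Nat} (hj : j < bs.length)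
    (i : Nat) (f : List α → List α) :
    (bs.modify i f).getD j [] = if i = j then f (bs.getD j []) else bs.getD j [] := by
  rw [List.getD_eq_getElem?_getD, List.getD_eq_getElem?_getD, List.getElem?_modify,
      List.getElem?_eq_getElem hj]
  split <;> simp

-- modify-fold bucket lemma
theorem pv_getD_foldl_modify {σ α : Type} (l : List σ) (P : σ → Bool) (idx : σ → Nat)
    (g : σ → α) (bs : List (List α)) (j : Nat) (hj : j < bs.length) :
    (l.foldl (fun bs x => if P x then bs.modify (idx x) (· ++ [g x]) else bs) bs).getD j [] =
      bs.getD j [] ++ (l.filter (fun x => P x && idx x == j)).map g := by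
  induction l generalizing bs with
  | nil => simp
  | cons x l ih =>
    simp only [List.foldl_cons, List.filter_cons]
    by_cases hP : P x
    · rw [if_pos hP, ih _ (by simpa using hj)]
      rw [pv_getD_modify bs hj (idx x) _]
      by_cases hidx : idx x = j
      · have hc : (P x && (idx x == j)) = true := by simp [hP, hidx]
        rw [hc, if_pos hidx]
        simp
      · have hc : (P x && (idx x == j)) = false := by simp [hP, hidx]
        rw [hc, if_neg hidx]
        simp
    · rw [if_neg hP, ih _ hj]
      have hc : (P x && (idx x == j)) = false := by simp [hP]
      rw [hc]
      simp

theorem pv_length_foldl_modify {σ α : Type} (l : List σ) (P : σ → Bool) (idx : σ → Nat)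
    (g : σ → α) (bs : List (List α)) :
    (l.foldl (fun bs x => if P x then bs.modify (idx x) (· ++ [g x]) else bs) bs).length = bs.length := by
  induction l generalizing bs with
  | nil => rfl
  | cons x l ih => simp only [List.foldl_cons]; rw [ih]; split <;> simp

theorem pv_range_filter (n j : Nat) (q : Nat → Bool) (hj : j < n) :
    (List.range n).filter (fun k => q k && (k == j)) = if q j then [j] else [] := by
  induction n with
  | zero => omega
  | succ n ih =>
    rw [List.range_succ, List.filter_append]
    by_cases h : j < n
    · rw [ih h]
      have : (n == j) = false := by simp; omega
      simp [this]
    · have hjn : j = n := by omega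
      subst hjn
      have : (List.range j).filter (fun k => q k && (k == j)) = [] := by
        rw [List.filter_eq_nil_iff]
        intro k hk
        simp at hk ⊢
        intro _; omega
      rw [this]
      by_cases hq : q j <;> simp [List.filter, hq]

theorem pv_if_append {β : Type} (b : Bool) (acc : List β) (x : β) (y : List β) :
    (if b then acc ++ [x] else acc) ++ y = acc ++ ((if b then [x] else []) ++ y) := by
  cases b <;> simp

theorem pv_written_index (k : Nat) (hk : k < pvWritten.length) :
    PySem.List.index? pvWritten pvWritten[k] = some (0 + k) := by
  have hg : pvWritten[k] = pvWritten.getD k "" := (List.getD_eq_getElem _ _ hk).symm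
  rw [hg]
  have h : ∀ i : Fin 11,
      PySem.List.index? pvWritten (pvWritten.getD (i : Nat) "") = some (0 + (i : Nat)) := by decide
  have hk' : k < 11 := by simpa [pvWritten] using hk
  exact h ⟨k, hk'⟩

-- A's per-position word scan equals pvWordPart
theorem pv_wordsA_eq (cs : List Char) (k : Nat) :
    (pvWritten.filter (fun w =>
        PySem.Chars.isIn w.toList
          (PySem.List.slice cs (some ((k : Nat) : Int)) (some (((k : Nat) : Int) + (w.toList.length : Int)))))).map
      (fun w => PySem.Int.toStr (((PySem.List.index? pvWritten w).getD 0 : Nat) : Int)) =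
      pvWordPart cs k := by
  have hfc : ∀ w : String,
      PySem.Chars.isIn w.toList
          (PySem.List.slice cs (some ((k : Nat) : Int)) (some (((k : Nat) : Int) + (w.toList.length : Int)))) =
        PySem.Chars.startswith (cs.drop k) w.toList := fun w => pv_cond_eq cs k w.toList
  rw [List.filter_congr (fun w _ => hfc w)]
  have := pv_words_eq_gen pvWritten (fun w => PySem.Chars.startswith (cs.drop k) w.toList)
    PySem.Int.toStr pvWritten 0 pv_written_index
  rw [this]
  rfl

theorem pv_parse_eq (v : String) :
    parse v = PySem.Str.join "" ((List.range v.toList.length).flatMap (pvContrib v.toList)) := by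
  unfold parse
  rw [show (0:Int) = ((0:Nat):Int) from rfl, pv_enum_eq, List.foldl_map]
  simp only [PySem.List.foldl_append_if, pv_if_append, PySem.List.foldl_append_eq_flatMap]
  rw [List.nil_append]
  congr 1
  have hfun : (fun x : Nat =>
      (if PySem.Chars.isIn [v.toList.getD x ' '] pvDigits.toList = true then
          [String.singleton (v.toList.getD x ' ')] else []) ++
        List.map (fun w => PySem.Int.toStr (((PySem.List.index? pvWritten w).getD 0 : Nat) : Int))
          (List.filter (fun w =>
              PySem.Chars.isIn w.toList
                (PySem.List.slice v.toList (some ((0 + x : Nat) : Int))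
                  (some (((0 + x : Nat) : Int) + (w.toList.length : Int))))) pvWritten)) =
      pvContrib v.toList := by
    funext k
    simp only [Nat.zero_add]
    unfold pvContrib pvDigitPart
    rw [pv_wordsA_eq]
  rw [hfun]

theorem pv_pass2_length (cs : List Char) (ws : List (Int × String)) (bs : List (List String)) :
    (ws.foldl (fun bs dw =>
      (PySem.List.pyRange 0 (cs.length : Int) 1).foldl (fun bs k =>
        if PySem.Chars.startswith (cs.drop k.toNat) dw.2.toList then
          bs.modify k.toNat (· ++ [PySem.Int.toStr dw.1])
        else bs) bs) bs).length = bs.length := by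
  induction ws generalizing bs with
  | nil => rfl
  | cons dw ws ih =>
    simp only [List.foldl_cons]
    rw [ih, pv_length_foldl_modify]

theorem pv_pass2_one (cs : List Char) (dw : Int × String) (bs : List (List String)) (j : Nat)
    (hb : bs.length = cs.length) (hj : j < cs.length) :
    ((PySem.List.pyRange 0 (cs.length : Int) 1).foldl (fun bs k =>
        if PySem.Chars.startswith (cs.drop k.toNat) dw.2.toList then
          bs.modify k.toNat (· ++ [PySem.Int.toStr dw.1])
        else bs) bs).getD j [] =
      bs.getD j [] ++ (if PySem.Chars.startswith (cs.drop j) dw.2.toList then [PySem.Int.toStr dw.1] else []) := by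
  rw [PySem.List.pyRange_one]
  simp only [Int.sub_zero, Int.toNat_natCast, Int.zero_add, List.foldl_map]
  rw [pv_getD_foldl_modify (List.range cs.length)
       (fun y => PySem.Chars.startswith (List.drop y cs) dw.2.toList)
       (fun y => y) (fun _ => PySem.Int.toStr dw.1) bs j (by rw [hb]; exact hj)]
  rw [pv_range_filter cs.length j
    (fun y => PySem.Chars.startswith (List.drop y cs) dw.2.toList) hj]
  split <;> simp

theorem pv_pass2_getD (cs : List Char) (ws : List (Int × String)) (bs : List (List String)) (j : Nat)
    (hb : bs.length = cs.length) (hj : j < cs.length) :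
    (ws.foldl (fun bs dw =>
      (PySem.List.pyRange 0 (cs.length : Int) 1).foldl (fun bs k =>
        if PySem.Chars.startswith (cs.drop k.toNat) dw.2.toList then
          bs.modify k.toNat (· ++ [PySem.Int.toStr dw.1])
        else bs) bs) bs).getD j [] =
      bs.getD j [] ++ ws.flatMap (fun dw =>
        if PySem.Chars.startswith (cs.drop j) dw.2.toList then [PySem.Int.toStr dw.1] else []) := by
  induction ws generalizing bs with
  | nil => simp
  | cons dw ws ih =>
    simp only [List.foldl_cons, List.flatMap_cons]
    rw [ih _ (by rw [pv_length_foldl_modify]; exact hb), pv_pass2_one cs dw bs j hb hj,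
      List.append_assoc]

theorem pv_pass1_getD (cs : List Char) (j : Nat) (hj : j < cs.length) :
    ((PySem.List.enumerate cs 0).foldl (fun bs p =>
        if PySem.Chars.isIn [p.2] pvDigits.toList then
          bs.modify p.1.toNat (· ++ [String.singleton p.2])
        else bs) (List.replicate cs.length [])).getD j [] = pvDigitPart cs j := by
  rw [show (0:Int) = ((0:Nat):Int) from rfl, pv_enum_eq, List.foldl_map]
  simp only [Nat.zero_add, Int.toNat_natCast]
  rw [pv_getD_foldl_modify (List.range cs.length)
       (fun y => PySem.Chars.isIn [cs.getD y ' '] pvDigits.toList)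
       (fun y => y) (fun y => String.singleton (cs.getD y ' '))
       (List.replicate cs.length []) j (by simpa using hj)]
  rw [pv_range_filter cs.length j
    (fun y => PySem.Chars.isIn [cs.getD y ' '] pvDigits.toList) hj]
  unfold pvDigitPart
  split <;> simp

theorem pv_parse_alt_eq (v : String) :
    parse_alt v = PySem.Str.join "" ((List.range v.toList.length).flatMap (pvContrib v.toList)) := by
  unfold parse_alt
  dsimp only
  congr 1
  have hb1 : ((PySem.List.enumerate v.toList 0).foldl (fun bs p =>
      if PySem.Chars.isIn [p.2] pvDigits.toList then
        bs.modify p.1.toNat (· ++ [String.singleton p.2])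
      else bs) (List.replicate v.toList.length [])).length = v.toList.length := by
    rw [pv_length_foldl_modify]; simp
  have hB2 : ((PySem.List.enumerate pvWritten 0).foldl (fun bs dw =>
      (PySem.List.pyRange 0 (v.toList.length : Int) 1).foldl (fun bs k =>
        if PySem.Chars.startswith (v.toList.drop k.toNat) dw.2.toList then
          bs.modify k.toNat (· ++ [PySem.Int.toStr dw.1])
        else bs) bs)
      ((PySem.List.enumerate v.toList 0).foldl (fun bs p =>
        if PySem.Chars.isIn [p.2] pvDigits.toList then
          bs.modify p.1.toNat (· ++ [String.singleton p.2])
        else bs) (List.replicate v.toList.length []))) =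
      (List.range v.toList.length).map (pvContrib v.toList) := by
    apply List.ext_getElem
    · rw [pv_pass2_length, hb1]; simp
    · intro i h1 h2
      have hi : i < v.toList.length := by
        rw [List.length_map, List.length_range] at h2; exact h2
      rw [List.getElem_map, List.getElem_range]
      rw [← List.getD_eq_getElem _ [] h1]
      rw [pv_pass2_getD v.toList _ _ i hb1 hi, pv_pass1_getD v.toList i hi]
      rfl
  rw [hB2, List.flatMap_map]
  rfl

-- ===== VERDICT (by name: the statement is the Claim_ definition above) =====
theorem parse_spec : Claim_equal_parse := by
  intro v _
  unfold Spec_parse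
  rw [pv_parse_eq, pv_parse_alt_eq]
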